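-- pv_equiv track=rewrite | github.com/P3RP/daily-algorithm-test | kty/kakao/징검다리건너기.py | solution
-- ===== SOURCE A (Python) =====
-- def solution(stones, k):
--     answer = 0
--
--     min_people = 1
--     max_people = max(stones)
--
--     while(min_people <= max_people):
--         mid_people = (min_people + max_people) // 2
--
--         # stone 을 건널 수 있다면 더 많은 사람이 건너갈 수 있다는 것
--         break_stone = 0
--         for stone in stones:
--             # stone 이 0 보다 작으면 건너는 것이 불가능해졌다는 것
--             # 0 인 경우엔 건너는 것은 가능하다.
--             if stone - mid_people < 0 :
--                 break_stone += 1
--             else :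
--                 break_stone = 0
--
--             if break_stone == k :
--                 break
--
--         if break_stone >= k :
--             max_people = mid_people - 1
--         else :
--             min_people = mid_people + 1
--             answer = max(mid_people, answer)
--
--
--     return answer
-- ===== SOURCE B (Python) =====
-- def solution(stones, k):
--     n = len(stones)
--     if k > n:
--         return max(0, max(stones))
--     return max(0, min(max(stones[i:i + k]) for i in range(n - k + 1)))
-- ===== Notes on version B (the rewrite author's own statement) =====
-- stated objective: simpler
-- what changed: Replaces A's binary search over candidate crowd sizes (each tested by a run-length scan with early break) with a direct one-liner: the answer is the minimum over all length-k windows of the window maximum, clamped at 0 (max of all stones when k exceeds the list length).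
-- outside the precondition, e.g. on solution([5], 0): A returns 0, B raises ValueError; on solution([3, 1], -1): A returns 0, B raises ValueError
import Mathlib
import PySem

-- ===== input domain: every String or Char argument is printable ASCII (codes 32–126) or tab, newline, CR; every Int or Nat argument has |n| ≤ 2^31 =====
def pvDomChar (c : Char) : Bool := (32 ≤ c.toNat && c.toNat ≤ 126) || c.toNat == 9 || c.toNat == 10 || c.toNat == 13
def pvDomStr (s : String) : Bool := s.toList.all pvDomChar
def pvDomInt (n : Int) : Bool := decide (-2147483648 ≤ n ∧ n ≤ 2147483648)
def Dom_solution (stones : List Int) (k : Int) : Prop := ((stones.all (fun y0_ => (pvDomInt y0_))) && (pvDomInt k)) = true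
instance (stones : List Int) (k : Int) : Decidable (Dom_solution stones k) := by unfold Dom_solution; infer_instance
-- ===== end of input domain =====

-- B replaces A's binary search + feasibility scan by the direct formula "min over
-- length-k windows of the window maximum, clamped at 0" — simpler, not faster.


-- ===== PORT A =====
-- the 'for stone in stones' scan: break_stone run counter with early break at == k
def solutionCheck (k mid : Int) : List Int → Int → Int
  | [], bs => bs
  | s :: rest, bs =>
      let bs' := if s - mid < 0 then bs + 1 else 0
      if bs' == k then bs' else solutionCheck k mid rest bs'

-- the 'while (min_people <= max_people)' binary search
def solutionLoop (stones : List Int) (k lo hi ans : Int) : Int :=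
  if h : lo ≤ hi then
    let mid := PySem.Int.floordiv (lo + hi) 2
    let bs := solutionCheck k mid stones 0
    if bs ≥ k then
      solutionLoop stones k lo (mid - 1) ans
    else
      solutionLoop stones k (mid + 1) hi (max mid ans)
  else ans
termination_by (hi + 1 - lo).toNat
decreasing_by
  all_goals
    have hb := PySem.Int.floordiv_two_mid_bounds h
    omega

def solution (stones : List Int) (k : Int) : Int :=
  match PySem.List.max? stones (fun x => x) with
  | none => 0      -- dead under Pre_: max([]) raises ValueError, stones = [] is excluded
  | some maxPeople => solutionLoop stones k 1 maxPeople 0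

-- ===== PORT B =====
def solution_alt (stones : List Int) (k : Int) : Int :=
  let n : Int := stones.length
  if k > n then
    max 0 ((PySem.List.max? stones (fun x => x)).getD 0)   -- getD dead under Pre_ (stones ≠ [])
  else
    let vals := (PySem.List.pyRange 0 (n - k + 1) 1).map
      (fun i => (PySem.List.max? (PySem.List.slice stones (some i) (some (i + k))) (fun x => x)).getD 0)
    max 0 ((PySem.List.min? vals (fun x => x)).getD 0)     -- getD dead under Pre_ (1 ≤ k ≤ n gives a window)

-- ===== PRECONDITION & SPEC =====
-- Pre_ excludes stones = [] (A raises ValueError in max(stones)) and k ≤ 0, which is outside the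
-- stepping-stones problem's domain: there B raises ValueError (empty window), while A still returns 0.
def Pre_solution (stones : List Int) (k : Int) : Prop := stones ≠ [] ∧ 1 ≤ k
instance (stones : List Int) (k : Int) : Decidable (Pre_solution stones k) := by unfold Pre_solution; infer_instance
def pvWitness_solution : List Int × Int := ([2, 4, 5, 3, 2, 1, 4, 2, 5, 1], 3)

def Spec_solution (stones : List Int) (k : Int) (out : Int) : Prop := out = solution_alt stones k
instance (stones : List Int) (k : Int) (out : Int) : Decidable (Spec_solution stones k out) := by unfold Spec_solution; infer_instance

-- ===== CLAIM (what is proved, stated in full; the proofs are below) =====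
def Claim_equal_solution : Prop := ∀ (stones : List Int) (k : Int), Dom_solution stones k → Pre_solution stones k → Spec_solution stones k (solution stones k)

-- ===== LEMMAS AND PROOFS =====

-- "some kn consecutive elements of l are all < m"
def winFail (l : List Int) (kn : Nat) (m : Int) : Prop :=
  ∃ i : Nat, i + kn ≤ l.length ∧ ∀ x ∈ (l.drop i).take kn, x < m

lemma winFail_mono {l : List Int} {kn : Nat} {m m' : Int} (h : m ≤ m') :
    winFail l kn m → winFail l kn m' := by
  rintro ⟨i, hi, hall⟩
  exact ⟨i, hi, fun x hx => lt_of_lt_of_le (hall x hx) h⟩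

lemma winFail_cons {s : List Int} {a : Int} {kn : Nat} {m : Int} :
    winFail (a :: s) kn m ↔
      (kn ≤ s.length + 1 ∧ ∀ x ∈ (a :: s).take kn, x < m) ∨ winFail s kn m := by
  constructor
  · rintro ⟨i, hi, hall⟩
    cases i with
    | zero => exact Or.inl ⟨by simpa using hi, by simpa using hall⟩
    | succ j => exact Or.inr ⟨j, by simp at hi; omega, by simpa using hall⟩
  · rintro (⟨hlen, hall⟩ | ⟨j, hj, hall⟩)
    · exact ⟨0, by simpa using hlen, by simpa using hall⟩
    · exact ⟨j + 1, by simp; omega, by simpa using hall⟩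

lemma mem_take_of_le {l : List Int} {i j : Nat} (h : i ≤ j) {x : Int}
    (hx : x ∈ l.take i) : x ∈ l.take j := by
  have he : l.take i = (l.take j).take i := by rw [List.take_take]; congr 1; omega
  rw [he] at hx
  exact List.take_subset _ _ hx

lemma check_char (k m : Int) (hk : 1 ≤ k) :
    ∀ (l : List Int) (bs : Int), 0 ≤ bs → bs < k →
      (solutionCheck k m l bs ≥ k ↔
        (((k - bs).toNat ≤ l.length ∧ ∀ x ∈ l.take (k - bs).toNat, x < m) ∨ winFail l k.toNat m)) := by
  intro l
  induction l with
  | nil =>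
    intro bs h0 h1
    have hL : solutionCheck k m ([] : List Int) bs = bs := rfl
    rw [hL]
    constructor
    · intro h; omega
    · rintro (⟨hlen, _⟩ | ⟨i, hi, _⟩)
      · simp only [List.length_nil] at hlen; omega
      · simp only [List.length_nil] at hi; omega
  | cons a s ih =>
    intro bs h0 h1
    by_cases ha : a - m < 0
    · by_cases heq : bs + 1 = k
      · have hL : solutionCheck k m (a :: s) bs = bs + 1 := by
          simp [solutionCheck, ha, heq]
        rw [hL]
        constructor
        · intro _
          left
          have ht1 : (k - bs).toNat = 1 := by omega
          rw [ht1]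
          refine ⟨by simp, ?_⟩
          intro x hx
          simp only [List.take_succ_cons, List.take_zero, List.mem_singleton] at hx
          omega
        · intro _; omega
      · have hbs1 : bs + 1 < k := by omega
        have hL : solutionCheck k m (a :: s) bs = solutionCheck k m s (bs + 1) := by
          simp [solutionCheck, ha, heq]
        rw [hL, ih (bs + 1) (by omega) hbs1, winFail_cons]
        have htn : (k - bs).toNat = (k - (bs + 1)).toNat + 1 := by omega
        constructor
        · rintro (⟨hlen, hall⟩ | hw)
          · left
            rw [htn]
            refine ⟨by simp; omega, ?_⟩
            intro x hx
            rw [List.take_succ_cons] at hx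
            rcases List.mem_cons.mp hx with rfl | hx'
            · omega
            · exact hall x hx'
          · exact Or.inr (Or.inr hw)
        · rintro (⟨hlen, hall⟩ | ⟨hlen0, hall0⟩ | hw)
          · left
            rw [htn] at hlen hall
            simp only [List.length_cons] at hlen
            refine ⟨by omega, ?_⟩
            intro x hx
            exact hall x (by rw [List.take_succ_cons]; exact List.mem_cons_of_mem _ hx)
          · left
            refine ⟨by omega, ?_⟩
            intro x hx
            apply hall0
            have hkn : k.toNat = (k.toNat - 1) + 1 := by omega
            rw [hkn, List.take_succ_cons]
            exact List.mem_cons_of_mem _ (mem_take_of_le (by omega) hx)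
          · exact Or.inr hw
    · have hL : solutionCheck k m (a :: s) bs = solutionCheck k m s 0 := by
        have h0k : ¬ ((0 : Int) = k) := by omega
        simp [solutionCheck, ha, h0k]
      rw [hL, ih 0 le_rfl (by omega), winFail_cons]
      constructor
      · rintro (⟨hlen, hall⟩ | hw)
        · refine Or.inr (Or.inr ⟨0, ?_, ?_⟩)
          · simpa using hlen
          · simpa using hall
        · exact Or.inr (Or.inr hw)
      · rintro (⟨hlen, hall⟩ | ⟨hlen0, hall0⟩ | hw)
        · exfalso
          have hmem : a ∈ (a :: s).take (k - bs).toNat := by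
            have ht : (k - bs).toNat = ((k - bs).toNat - 1) + 1 := by omega
            rw [ht, List.take_succ_cons]
            exact List.mem_cons_self
          have := hall a hmem
          omega
        · exfalso
          have hmem : a ∈ (a :: s).take k.toNat := by
            have ht : k.toNat = (k.toNat - 1) + 1 := by omega
            rw [ht, List.take_succ_cons]
            exact List.mem_cons_self
          have := hall0 a hmem
          omega
        · exact Or.inr hw

lemma check0_iff (stones : List Int) (k m : Int) (hk : 1 ≤ k) :
    (solutionCheck k m stones 0 ≥ k ↔ winFail stones k.toNat m) := by
  rw [check_char k m hk stones 0 le_rfl (by omega)]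
  simp only [sub_zero]
  constructor
  · rintro (⟨hlen, hall⟩ | hw)
    · exact ⟨0, by simpa using hlen, by simpa using hall⟩
    · exact hw
  · exact Or.inr

lemma loop_eq (stones : List Int) (k : Int) (hk : 1 ≤ k) (T M0 : Int)
    (hT0 : T = 0 ∨ ¬ winFail stones k.toNat T)
    (hT1 : winFail stones k.toNat (T + 1) ∨ T = M0) :
    ∀ lo hi ans : Int, 1 ≤ lo → ans = lo - 1 → lo - 1 ≤ T → T ≤ hi → hi ≤ M0 →
      solutionLoop stones k lo hi ans = T := by
  intro lo hi ans
  induction lo, hi, ans using solutionLoop.induct stones k with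
  | case1 lo hi ans hcond mid bs hbs ih =>
    intro h1 h2 h3 h4 h5
    have hmid := PySem.Int.floordiv_two_mid_bounds hcond
    rw [solutionLoop, dif_pos hcond]
    simp only [ge_iff_le]
    rw [if_pos (by exact hbs)]
    have hwf : winFail stones k.toNat mid := (check0_iff stones k mid hk).mp hbs
    have hTlt : T < mid := by
      rcases hT0 with h | h
      · omega
      · by_contra hc
        exact h (winFail_mono (by omega) hwf)
    exact ih h1 h2 h3 (by omega) (by omega)
  | case2 lo hi ans hcond mid bs hbs ih =>
    intro h1 h2 h3 h4 h5
    have hmid := PySem.Int.floordiv_two_mid_bounds hcond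
    rw [solutionLoop, dif_pos hcond]
    simp only [ge_iff_le]
    rw [if_neg (by exact hbs)]
    have hwf : ¬ winFail stones k.toNat mid := by
      intro hc
      exact hbs ((check0_iff stones k mid hk).mpr hc)
    have hTge : mid ≤ T := by
      rcases hT1 with h | h
      · by_contra hc
        exact hwf (winFail_mono (by omega) h)
      · omega
    have hmax : max mid ans = mid := by rw [h2]; omega
    rw [hmax] at ih ⊢
    exact ih (by omega) (by omega) (by omega) h4 h5
  | case3 lo hi ans hcond =>
    intro h1 h2 h3 h4 h5
    rw [solutionLoop, dif_neg hcond]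
    omega

lemma slice_window (stones : List Int) (k i : Int) (h0 : 0 ≤ i) (hk : 0 ≤ k) :
    PySem.List.slice stones (some i) (some (i + k)) = (stones.drop i.toNat).take k.toNat := by
  rw [PySem.List.slice_toNat stones h0 (by omega)]
  congr 1
  omega

lemma win_max (stones : List Int) (kn i : Nat) (hkn : 1 ≤ kn) (hi : i + kn ≤ stones.length) :
    ∃ w, PySem.List.max? ((stones.drop i).take kn) (fun x => x) = some w := by
  cases hmax : PySem.List.max? ((stones.drop i).take kn) (fun x => x) with
  | some w => exact ⟨w, rfl⟩
  | none =>
    exfalso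
    rw [PySem.List.max?_eq_none_iff] at hmax
    have hl : ((stones.drop i).take kn).length = 0 := by rw [hmax]; rfl
    simp only [List.length_take, List.length_drop] at hl
    omega

-- ===== VERDICT (by name: the statement is the Claim_ definition above) =====
theorem solution_spec : Claim_equal_solution := by
  intro stones k _hdom hpre
  obtain ⟨hne, hk⟩ := hpre
  unfold Spec_solution
  cases hmax : PySem.List.max? stones (fun x => x) with
  | none => exact absurd ((PySem.List.max?_eq_none_iff _ _).mp hmax) hne
  | some M0 =>
    have hub : ∀ y ∈ stones, y ≤ M0 := PySem.List.max?_isMax hmax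
    simp only [solution, hmax]
    by_cases hkn : k > (stones.length : Int)
    · -- no full window: answer is max(0, max(stones))
      have hB : solution_alt stones k = max 0 M0 := by
        simp only [solution_alt, if_pos hkn, hmax, Option.getD_some]
      rw [hB]
      have hnoWF : ∀ m : Int, ¬ winFail stones k.toNat m := by
        rintro m ⟨i, hi, -⟩
        omega
      by_cases hM : M0 ≤ 0
      · rw [solutionLoop, dif_neg (by omega)]
        omega
      · have hT : max 0 M0 = M0 := by omega
        rw [hT]
        exact loop_eq stones k hk M0 M0 (Or.inr (hnoWF M0)) (Or.inr rfl)
          1 M0 0 le_rfl rfl (by omega) le_rfl le_rfl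
    · -- k ≤ len: answer is max(0, min of window maxima)
      have hkl : k ≤ (stones.length : Int) := by omega
      set n : Int := (stones.length : Int) with hn
      set f : Int → Int :=
        fun i => (PySem.List.max? (PySem.List.slice stones (some i) (some (i + k))) (fun x => x)).getD 0 with hf
      set vals : List Int := (PySem.List.pyRange 0 (n - k + 1) 1).map f with hvals
      have hB : solution_alt stones k = max 0 ((PySem.List.min? vals (fun x => x)).getD 0) := by
        simp only [solution_alt, if_neg (by omega : ¬ (k > (stones.length : Int)))]
        rfl
      -- each index in range yields a genuine window with a maximum
      have hwinmax : ∀ i : Int, 0 ≤ i → i < n - k + 1 →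
          ∃ w, f i = w ∧ w ∈ (stones.drop i.toNat).take k.toNat ∧
            ∀ x ∈ (stones.drop i.toNat).take k.toNat, x ≤ w := by
        intro i hi0 hi1
        obtain ⟨w, hw⟩ := win_max stones k.toNat i.toNat (by omega) (by omega)
        refine ⟨w, ?_, PySem.List.max?_mem hw, PySem.List.max?_isMax hw⟩
        rw [hf]
        simp only [slice_window stones k i hi0 (by omega), hw, Option.getD_some]
      have hvne : vals ≠ [] := by
        intro hnil
        have : vals.length = 0 := by rw [hnil]; rfl
        rw [hvals, List.length_map, PySem.List.length_pyRange_one] at this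
        omega
      cases hminv : PySem.List.min? vals (fun x => x) with
      | none => exact absurd ((PySem.List.min?_eq_none_iff _ _).mp hminv) hvne
      | some W =>
        rw [hB, hminv, Option.getD_some]
        -- W is attained by some window i0
        have hWmem : W ∈ vals := PySem.List.min?_mem hminv
        rw [hvals, List.mem_map] at hWmem
        obtain ⟨i0, hi0r, hi0⟩ := hWmem
        rw [PySem.List.mem_pyRange_one] at hi0r
        obtain ⟨w0, hw0eq, hw0mem, hw0ub⟩ := hwinmax i0 hi0r.1 hi0r.2
        have hWw0 : W = w0 := by rw [← hi0, hw0eq]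
        -- W is below every window's maximum
        have hWlb : ∀ i : Int, 0 ≤ i → i < n - k + 1 → W ≤ f i := by
          intro i h0 h1
          exact PySem.List.min?_isMin hminv (f i)
            (by rw [hvals]; exact List.mem_map_of_mem (by rw [PySem.List.mem_pyRange_one]; exact ⟨h0, h1⟩))
        -- W ≤ M0
        have hWM0 : W ≤ M0 := by
          rw [hWw0]
          exact hub w0 (List.drop_subset _ _ (List.take_subset _ _ hw0mem))
        by_cases hM : M0 ≤ 0
        · rw [solutionLoop, dif_neg (by omega)]
          omega
        · -- M0 ≥ 1 : run the binary-search characterisation with T = max 0 W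
          have hT1 : winFail stones k.toNat (max 0 W + 1) :=
            ⟨i0.toNat, by omega, fun x hx => by have := hw0ub x hx; omega⟩
          have hT0 : max 0 W = 0 ∨ ¬ winFail stones k.toNat (max 0 W) := by
            by_cases hW0 : W ≤ 0
            · left; omega
            · right
              have hTW : max 0 W = W := by omega
              rw [hTW]
              rintro ⟨i, hi, hall⟩
              obtain ⟨w, hweq, hwmem, -⟩ := hwinmax (i : Int) (by omega) (by omega)
              have h1 := hall w (by simpa using hwmem)
              have h2 := hWlb (i : Int) (by omega) (by omega)
              rw [hweq] at h2
              omega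
          exact loop_eq stones k hk (max 0 W) M0 hT0 (Or.inl hT1)
            1 M0 0 le_rfl rfl (by omega) (by omega) le_rfl
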